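-- pv_equiv track=rewrite | github.com/1LovU/HackerRank | game-of-throne-ii.py | countPalin
-- ===== SOURCE A (Python) =====
-- from collections import defaultdict
-- from math import factorial
--
-- def countPalin(s):
--     counter = defaultdict(int)
--     for item in s:
--         counter[item] += 1
--     n = len(s)//2
--     ans = factorial(n)
--
--     for val in counter.values():
--         ans //= factorial(val//2)
--
--     return int(ans % MOD)
--
-- MOD = (10**9 + 7)
-- ===== SOURCE B (Python) =====
-- from collections import Counter
-- from math import comb
--
-- MOD = (10**9 + 7)
--
-- def countPalin(s):
--     # Different algorithm: no factorial division at all. Build the answer as a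
--     # product of binomial coefficients over the running sum of half-counts
--     # (multinomial identity), then multiply the rising product up to len(s)//2.
--     total = 0
--     ans = 1
--     for c in Counter(s).values():
--         h = c // 2
--         total += h
--         ans *= comb(total, h)
--     for t in range(total + 1, len(s) // 2 + 1):
--         ans *= t
--     return ans % MOD
-- ===== Notes on version B (the rewrite author's own statement) =====
-- stated objective: alternative
-- what changed: B never divides: instead of computing factorial(len(s)//2) and repeatedly floor-dividing it by factorial(count//2) per character, it multiplies binomial coefficients comb(runningSum, half) over the half-counts (multinomial identity) and then the rising product from runningSum+1 to len(s)//2, taking the modulus once at the end.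
import Mathlib
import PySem

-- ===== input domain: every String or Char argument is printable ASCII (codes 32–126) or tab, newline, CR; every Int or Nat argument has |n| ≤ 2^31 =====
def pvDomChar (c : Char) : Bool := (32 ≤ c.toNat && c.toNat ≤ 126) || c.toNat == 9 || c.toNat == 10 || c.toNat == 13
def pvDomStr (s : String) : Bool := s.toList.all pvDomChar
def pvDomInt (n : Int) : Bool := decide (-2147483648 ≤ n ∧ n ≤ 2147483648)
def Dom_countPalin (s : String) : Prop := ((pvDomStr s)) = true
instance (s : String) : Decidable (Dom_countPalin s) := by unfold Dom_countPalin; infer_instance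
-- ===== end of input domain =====

-- B replaces A's factorial divisions by a product of binomial coefficients over the
-- running sum of half-counts plus a rising product (multinomial identity): no division.

-- ===== PORT A =====
-- math.factorial; every argument passed to it in either port is ≥ 0, where toNat is exact
def pyFactorial (n : Int) : Int := (Nat.factorial n.toNat : Int)

def countPalin (s : String) : Int :=
  let counter := s.toList.foldl (fun d c => d.modify c 0 (· + 1))
      (PySem.Dict.empty : PySem.Dict Char Int)
  let n := PySem.Int.floordiv (PySem.Str.len s) 2
  let ans := pyFactorial n
  let ans := counter.values.foldl
      (fun a v => PySem.Int.floordiv a (pyFactorial (PySem.Int.floordiv v 2))) ans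
  PySem.Int.mod ans 1000000007

-- ===== PORT B =====
-- math.comb; both arguments are ≥ 0 with k ≤ n at every call site here, where toNat is exact
def pyComb (n k : Int) : Int := (Nat.choose n.toNat k.toNat : Int)

-- the body of B's first loop: add the half-count to the running total, multiply the binomial
def combStep (p : Int × Int) (v : Int) : Int × Int :=
  let h := PySem.Int.floordiv v 2
  (p.1 + h, p.2 * pyComb (p.1 + h) h)

def countPalin_alt (s : String) : Int :=
  let st := (PySem.Dict.counter s.toList).values.foldl combStep (0, 1)
  let ans := (PySem.List.pyRange (st.1 + 1) (PySem.Int.floordiv (PySem.Str.len s) 2 + 1) 1).foldl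
      (fun a t => a * t) st.2
  PySem.Int.mod ans 1000000007

-- ===== PRECONDITION & SPEC =====
def Spec_countPalin (s : String) (out : Int) : Prop := out = countPalin_alt s
instance (s : String) (out : Int) : Decidable (Spec_countPalin s out) := by unfold Spec_countPalin; infer_instance

-- ===== CLAIM (what is proved, stated in full; the proofs are below) =====
def Claim_equal_countPalin : Prop := ∀ (s : String), Dom_countPalin s → Spec_countPalin s (countPalin s)

-- ===== LEMMAS AND PROOFS =====

-- A's division loop over natural values, pulled back to ℕ: it is one division by the product
theorem foldl_floordiv_fact (l : List Nat) (a : Nat) :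
    (l.map (Nat.cast : Nat → Int)).foldl
        (fun acc v => PySem.Int.floordiv acc (pyFactorial (PySem.Int.floordiv v 2))) (a : Int)
    = ((a / (l.map (fun m => Nat.factorial (m / 2))).prod : Nat) : Int) := by
  induction l generalizing a with
  | nil => simp
  | cons m l ih =>
    have h2 : PySem.Int.floordiv (m : Int) 2 = ((m / 2 : Nat) : Int) := by
      exact_mod_cast PySem.Int.floordiv_natCast m 2
    have h3 : pyFactorial ((m / 2 : Nat) : Int) = ((Nat.factorial (m / 2) : Nat) : Int) := by
      simp only [pyFactorial, Int.toNat_natCast]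
    have h4 : PySem.Int.floordiv ((a : Nat) : Int) ((Nat.factorial (m / 2) : Nat) : Int)
        = ((a / Nat.factorial (m / 2) : Nat) : Int) := PySem.Int.floordiv_natCast _ _
    rw [List.map_cons, List.foldl_cons, h2, h3, h4, ih]
    simp only [List.map_cons, List.prod_cons, Nat.div_div_eq_div_mul]

-- the natural-number shadow of B's binomial loop
def stepN (p : Nat × Nat) (h : Nat) : Nat × Nat := (p.1 + h, p.2 * Nat.choose (p.1 + h) h)

-- B's Int fold is the cast of the ℕ fold over the half-counts
theorem combStep_cast (l : List Nat) (S a : Nat) :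
    (l.map (Nat.cast : Nat → Int)).foldl combStep ((S : Int), (a : Int))
    = ((((l.map (· / 2)).foldl stepN (S, a)).1 : Int),
       (((l.map (· / 2)).foldl stepN (S, a)).2 : Int)) := by
  induction l generalizing S a with
  | nil => rfl
  | cons v l ih =>
    have h2 : PySem.Int.floordiv (v : Int) 2 = ((v / 2 : Nat) : Int) := by
      exact_mod_cast PySem.Int.floordiv_natCast v 2
    have hS : ((S : Int) + ((v / 2 : Nat) : Int)) = ((S + v / 2 : Nat) : Int) := by push_cast; ring
    have hc : pyComb ((S + v / 2 : Nat) : Int) ((v / 2 : Nat) : Int)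
        = ((Nat.choose (S + v / 2) (v / 2) : Nat) : Int) := by
      simp only [pyComb, Int.toNat_natCast]
    have ha : ((a : Int) * ((Nat.choose (S + v / 2) (v / 2) : Nat) : Int))
        = ((a * Nat.choose (S + v / 2) (v / 2) : Nat) : Int) := by push_cast; ring
    simp only [List.map_cons, List.foldl_cons, combStep, h2, hS, hc, ha, stepN]
    exact ih (S + v / 2) (a * Nat.choose (S + v / 2) (v / 2))

-- invariant of the binomial loop: the accumulator times the factorials is the factorial of the sum
theorem stepN_spec (hs : List Nat) (S a : Nat) :
    (hs.foldl stepN (S, a)).1 = S + hs.sum ∧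
    (hs.foldl stepN (S, a)).2 * (hs.map Nat.factorial).prod * Nat.factorial S
      = a * Nat.factorial (S + hs.sum) := by
  induction hs generalizing S a with
  | nil => simp
  | cons h hs ih =>
    obtain ⟨ih1, ih2⟩ := ih (S + h) (a * Nat.choose (S + h) h)
    refine ⟨?_, ?_⟩
    · simp only [List.foldl_cons, stepN, ih1, List.sum_cons]; omega
    · have hch : Nat.choose (S + h) h * Nat.factorial h * Nat.factorial S
          = Nat.factorial (S + h) := by
        have := Nat.choose_mul_factorial_mul_factorial (Nat.le_add_left h S)
        simpa [Nat.add_sub_cancel] using this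
      have hsum : S + (h + hs.sum) = S + h + hs.sum := by omega
      apply Nat.eq_of_mul_eq_mul_right (Nat.factorial_pos (S + h))
      calc (((h :: hs).foldl stepN (S, a)).2 * ((h :: hs).map Nat.factorial).prod
              * Nat.factorial S) * Nat.factorial (S + h)
          = ((hs.foldl stepN (S + h, a * Nat.choose (S + h) h)).2
              * (hs.map Nat.factorial).prod * Nat.factorial (S + h))
            * (Nat.factorial h * Nat.factorial S) := by
            simp only [List.foldl_cons, stepN, List.map_cons, List.prod_cons]; ring
        _ = (a * Nat.choose (S + h) h * Nat.factorial (S + h + hs.sum))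
            * (Nat.factorial h * Nat.factorial S) := by rw [ih2]
        _ = a * Nat.factorial (S + h + hs.sum)
            * (Nat.choose (S + h) h * Nat.factorial h * Nat.factorial S) := by ring
        _ = a * Nat.factorial (S + (h :: hs).sum) * Nat.factorial (S + h) := by
            rw [hch, List.sum_cons, hsum]

-- the rising product from S+1 to n completes S! to n!
theorem rise_prod (S d : Nat) :
    Nat.factorial S * ((List.range d).map (fun k => S + 1 + k)).prod
      = Nat.factorial (S + d) := by
  induction d with
  | zero => simp
  | succ d ih =>
    rw [List.range_succ, List.map_append, List.prod_append]
    simp only [List.map_cons, List.map_nil, List.prod_cons, List.prod_nil]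
    have : S + (d + 1) = (S + d) + 1 := by omega
    rw [this, Nat.factorial_succ, ← ih]
    ring

-- B's second loop: a left fold of multiplication is the initial value times the product
theorem foldl_mul_eq (l : List Int) (a : Int) :
    l.foldl (fun x y => x * y) a = a * l.prod := by
  induction l generalizing a with
  | nil => simp
  | cons x l ih => simp [ih, mul_assoc]

-- adding an element raises the count-sum over the distinct set by exactly one
theorem sum_map_add_at (l : List Char) (x : Char) (f g : Char → Nat)
    (hnd : l.Nodup) (hx : x ∈ l) (hgx : g x = f x + 1)
    (hother : ∀ c ∈ l, c ≠ x → g c = f c) :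
    (l.map g).sum = (l.map f).sum + 1 := by
  induction l with
  | nil => cases hx
  | cons a l ih =>
    have hnd' := hnd
    rw [List.nodup_cons] at hnd'
    rcases List.mem_cons.mp hx with rfl | hxl
    · have : l.map g = l.map f := by
        apply List.map_congr_left
        intro c hc
        exact hother c (List.mem_cons_of_mem _ hc) (fun h => hnd'.1 (h ▸ hc))
      simp [this, hgx]; omega
    · have hax : a ≠ x := fun h => hnd'.1 (h ▸ hxl)
      have hga : g a = f a := hother a (List.mem_cons_self) hax
      have := ih hnd'.2 hxl (fun c hc hcx => hother c (List.mem_cons_of_mem _ hc) hcx)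
      simp [hga, this]; omega

-- the counts over the distinct elements sum to the length of the list
theorem sum_counts (cs : List Char) :
    ((PySem.Set.ofList cs).map (fun c => cs.count c)).sum = cs.length := by
  induction cs using List.reverseRecOn with
  | nil => simp [PySem.Set.ofList]
  | append_singleton cs x ih =>
    have hcount : ∀ c : Char, (cs ++ [x]).count c = cs.count c + if c = x then 1 else 0 := by
      intro c
      rcases eq_or_ne c x with rfl | hne
      · simp [List.count_append]
      · simp [List.count_append, hne, Ne.symm hne]
    by_cases hmem : x ∈ cs
    · have hset : PySem.Set.ofList (cs ++ [x]) = PySem.Set.ofList cs := by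
        rw [PySem.Set.ofList_append_singleton, PySem.Set.add_of_mem]
        exact (PySem.Set.mem_ofList cs x).mpr hmem
      have := sum_map_add_at (PySem.Set.ofList cs) x
        (fun c => cs.count c) (fun c => (cs ++ [x]).count c)
        (PySem.Set.nodup_ofList cs) ((PySem.Set.mem_ofList cs x).mpr hmem)
        (by simp [hcount x])
        (fun c _ hcx => by simp [hcount c, hcx])
      rw [hset, this, ih]
      simp
    · have hset : PySem.Set.ofList (cs ++ [x]) = PySem.Set.ofList cs ++ [x] := by
        rw [PySem.Set.ofList_append_singleton, PySem.Set.add_of_not_mem]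
        exact fun h => hmem ((PySem.Set.mem_ofList cs x).mp h)
      have hmap : (PySem.Set.ofList cs).map (fun c => (cs ++ [x]).count c)
          = (PySem.Set.ofList cs).map (fun c => cs.count c) := by
        apply List.map_congr_left
        intro c hc
        have hcne : c ≠ x := fun h => hmem (h ▸ ((PySem.Set.mem_ofList cs c).mp hc))
        simp [hcount c, hcne]
      rw [hset, List.map_append, List.sum_append, hmap, ih]
      have hx0 : cs.count x = 0 := List.count_eq_zero.mpr hmem
      simp [hcount, hx0]

-- the sum of halves is at most half the sum
theorem sum_halves_le (l : List Nat) : (l.map (· / 2)).sum ≤ l.sum / 2 := by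
  induction l with
  | nil => simp
  | cons a l ih => simp only [List.map_cons, List.sum_cons]; omega

-- ===== VERDICT (by name: the statement is the Claim_ definition above) =====
theorem countPalin_spec : Claim_equal_countPalin := by
  intro s _
  unfold Spec_countPalin countPalin countPalin_alt
  simp only [PySem.Str.len_eq]
  set cs := s.toList with hcs
  -- the values of the counter, as casts of the natural counts over the distinct set
  have hvalues : (PySem.Dict.counter cs).values
      = ((PySem.Set.ofList cs).map (fun c => (cs.count c : Nat))).map (Nat.cast : Nat → Int) := by
    show (PySem.Dict.counter cs).items.map (·.2) = _
    rw [PySem.Dict.items_counter]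
    simp only [List.map_map]
    rfl
  have hAfold : cs.foldl (fun d c => d.modify c 0 (· + 1))
      (PySem.Dict.empty : PySem.Dict Char Int) = PySem.Dict.counter cs :=
    (PySem.Dict.counter_eq_foldl cs).symm
  set vals : List Nat := (PySem.Set.ofList cs).map (fun c => (cs.count c : Nat)) with hvals
  set hsl : List Nat := vals.map (· / 2) with hhsl
  set D : Nat := (hsl.map Nat.factorial).prod with hD
  set Sf : Nat := hsl.sum with hSf
  set n : Nat := cs.length / 2 with hn
  -- bound: Sf ≤ n
  have hSfn : Sf ≤ n := by
    have h1 := sum_halves_le vals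
    have h2 : vals.sum = cs.length := sum_counts cs
    rw [hSf, hhsl, hn, ← h2]
    exact h1
  -- A's side
  have hnint : PySem.Int.floordiv ((cs.length : Nat) : Int) 2 = ((n : Nat) : Int) := by
    exact_mod_cast PySem.Int.floordiv_natCast cs.length 2
  have hfact : pyFactorial ((n : Nat) : Int) = ((Nat.factorial n : Nat) : Int) := by
    simp only [pyFactorial, Int.toNat_natCast]
  have hA := foldl_floordiv_fact vals (Nat.factorial n)
  -- B's side: the binomial fold
  have hBfold := combStep_cast vals 0 1
  rw [Nat.cast_zero, Nat.cast_one] at hBfold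
  obtain ⟨hfst, hsnd⟩ := stepN_spec hsl 0 1
  set ansB : Nat := (hsl.foldl stepN (0, 1)).2 with hansB
  have hinv : ansB * D = Nat.factorial Sf := by
    have := hsnd
    simpa [hD, hSf, Nat.factorial] using this
  -- B's rising product
  have hrange : PySem.List.pyRange ((Sf : Int) + 1) ((n : Int) + 1) 1
      = ((List.range (n - Sf)).map (fun k => Sf + 1 + k)).map (Nat.cast : Nat → Int) := by
    rw [PySem.List.pyRange_one]
    have ht : (((n : Int) + 1) - ((Sf : Int) + 1)).toNat = n - Sf := by omega
    rw [ht, List.map_map]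
    apply List.map_congr_left
    intro k hk
    simp only [Function.comp]
    push_cast
    ring
  have hR : Nat.factorial Sf * ((List.range (n - Sf)).map (fun k => Sf + 1 + k)).prod
      = Nat.factorial n := by
    have := rise_prod Sf (n - Sf)
    rwa [Nat.add_sub_cancel' hSfn] at this
  set R : Nat := ((List.range (n - Sf)).map (fun k => Sf + 1 + k)).prod with hRdef
  -- the final equality of the two natural values
  have hDpos : 0 < D := by
    rw [hD]
    apply List.prod_pos
    intro x hx
    obtain ⟨y, _, rfl⟩ := List.mem_map.mp hx
    exact Nat.factorial_pos y
  have hkey : Nat.factorial n / D = ansB * R := by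
    apply Nat.div_eq_of_eq_mul_left hDpos
    calc Nat.factorial n = Nat.factorial Sf * R := hR.symm
      _ = (ansB * D) * R := by rw [hinv]
      _ = ansB * R * D := by ring
  -- assemble
  have hfst' : (((hsl.foldl stepN (0, 1)).1 : Nat) : Int) = ((Sf : Nat) : Int) := by
    rw [hfst]; simp [hSf]
  rw [hAfold, hvalues, hnint, hfact, hA, hBfold, hfst', foldl_mul_eq, hrange]
  have hprodcast : (((List.range (n - Sf)).map (fun k => Sf + 1 + k)).map
      (Nat.cast : Nat → Int)).prod = ((R : Nat) : Int) := by
    rw [hRdef]; push_cast; rfl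
  rw [hprodcast]
  congr 1
  have hDeq : (vals.map (fun m => Nat.factorial (m / 2))).prod = D := by
    simp only [hD, hhsl, hvals, List.map_map]; rfl
  have hfin : Nat.factorial n / (vals.map (fun m => Nat.factorial (m / 2))).prod = ansB * R := by
    rw [hDeq]; exact hkey
  rw [hfin]
  push_cast
  ring
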